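-- pv_equiv track=rewrite | github.com/exucutional/algealgo | problem6/solve.py | mul_expanded
-- ===== SOURCE A (Python) =====
-- def slice(m, r1, r2, c1, c2):
--     res = m[r1:r2]
--     for i in range(len(res)):
--         res[i] = res[i][c1:c2]
--
--     return res
--
-- def add(m1, m2):
--     res = []
--     for i in range(len(m1)):
--         res.append([0]*len(m1[0]))
--         for j in range(len(res[0])):
--             res[i][j] = (m1[i][j]+m2[i][j])%2
--
--     return res
--
-- def sub(m1, m2):
--     res = []
--     for i in range(len(m1)):
--         res.append([0]*len(m1[0]))
--         for j in range(len(res[0])):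
--             res[i][j] = (m1[i][j]-m2[i][j])%2
--
--     return res
--
-- def mul_expanded(m1, m2):
--     dim = len(m1)
--     if dim == 1:
--         return [[m1[0][0]*m2[0][0]]]
--
--     subdim = int(dim/2)
--     m1_11 = slice(m1, 0, subdim, 0, subdim)
--     m1_12 = slice(m1, 0, subdim, subdim, dim)
--     m1_21 = slice(m1, subdim, dim, 0, subdim)
--     m1_22 = slice(m1, subdim, dim, subdim, dim)
--     m2_11 = slice(m2, 0, subdim, 0, subdim)
--     m2_12 = slice(m2, 0, subdim, subdim, dim)
--     m2_21 = slice(m2, subdim, dim, 0, subdim)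
--     m2_22 = slice(m2, subdim, dim, subdim, dim)
--
--     d = mul_expanded(add(m1_11, m1_22), add(m2_11, m2_22))
--     d1 = mul_expanded(sub(m1_12, m1_22), add(m2_21, m2_22))
--     d2 = mul_expanded(sub(m1_21, m1_11), add(m2_11, m2_12))
--     h1 = mul_expanded(add(m1_11, m1_12), m2_22)
--     h2 = mul_expanded(add(m1_21, m1_22), m2_11)
--     v1 = mul_expanded(m1_22, sub(m2_21, m2_11))
--     v2 = mul_expanded(m1_11, sub(m2_12, m2_22))
--     res = []
--     for i in range(dim):
--         res.append([0]*dim)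
--         for j in range(dim):
--             subi = i-subdim
--             subj = j-subdim
--             if i < subdim and j < subdim:
--                 res[i][j] = d[i][j]+d1[i][j]+v1[i][j]-h1[i][j]
--             if i < subdim and not j < subdim:
--                 res[i][j] = v2[i][subj]+h1[i][subj]
--             if not i < subdim and j < subdim:
--                 res[i][j] = v1[subi][j]+h2[subi][j]
--             if not i < subdim and not j < subdim:
--                 res[i][j] = d[subi][subj]+d2[subi][subj]+v2[subi][subj]-h2[subi][subj]
--
--             res[i][j] %= 2
--
--     return res
-- ===== SOURCE B (Python) =====
-- def mul_expanded(m1, m2):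
--     n = len(m1)
--     return [[sum(m1[i][k] * m2[k][j] for k in range(n)) % 2 for j in range(n)]
--             for i in range(n)]
-- ===== Notes on version B (the rewrite author's own statement) =====
-- stated objective: simpler
-- what changed: Replaces the recursive Strassen scheme (slicing into quadrants, seven recursive products, add/sub/recombine helpers) with a single schoolbook triple loop computing each entry as a dot product reduced mod 2.
-- intended difference: On inputs with len(m1)==1 whose two leading entries have a product not already 0 or 1, A returns the raw unreduced product [[a*b]] while B returns [[a*b % 2]], the intended GF(2) value that A itself produces at every larger size. — e.g. on mul_expanded([[3]], [[5]]): A returns [[15]], B returns [[1]]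
import Mathlib
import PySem

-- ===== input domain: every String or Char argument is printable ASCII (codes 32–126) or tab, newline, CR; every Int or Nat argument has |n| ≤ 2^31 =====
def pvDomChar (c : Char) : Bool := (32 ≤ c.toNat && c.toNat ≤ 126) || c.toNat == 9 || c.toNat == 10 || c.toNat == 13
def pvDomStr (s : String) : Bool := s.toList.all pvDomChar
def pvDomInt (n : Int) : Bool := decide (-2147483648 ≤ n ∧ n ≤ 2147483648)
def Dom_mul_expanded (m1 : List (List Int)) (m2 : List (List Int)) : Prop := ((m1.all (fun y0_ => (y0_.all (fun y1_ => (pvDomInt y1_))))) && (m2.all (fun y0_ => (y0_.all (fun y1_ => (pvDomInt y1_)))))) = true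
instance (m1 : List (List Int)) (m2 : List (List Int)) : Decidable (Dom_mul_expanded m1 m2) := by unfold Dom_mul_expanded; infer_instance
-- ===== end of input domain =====

-- B replaces A's recursive Strassen scheme with the plain schoolbook product mod 2 (simpler).
-- Equivalence is over inputs supplying a full power-of-two leading block (Pre_); on 1x1 input A
-- skips the mod-2 reduction (D_).

-- ===== PORT A =====
-- Python m[i][j] for the non-negative in-range indices A uses (PySem.List.pyGetD_natCast).
def pvG (m : List (List Int)) (i j : Nat) : Int := (m.getD i []).getD j 0

-- slice(m, r1, r2, c1, c2): m[r1:r2] with each row then replaced in place by row[c1:c2];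
-- that in-place loop over range(len(res)) is this map.
def pvSlice (m : List (List Int)) (r1 r2 c1 c2 : Nat) : List (List Int) :=
  (PySem.List.slice m (some (r1 : Int)) (some (r2 : Int))).map
    (fun row => PySem.List.slice row (some (c1 : Int)) (some (c2 : Int)))

-- add(m1, m2): row i is appended as a zero row of length len(m1[0]) and each slot j is then
-- overwritten with (m1[i][j]+m2[i][j]) % 2 — i.e. this map over both index ranges.
def pvAdd (m1 m2 : List (List Int)) : List (List Int) :=
  (List.range m1.length).map (fun i =>
    (List.range (m1.headD []).length).map (fun j =>
      PySem.Int.mod (pvG m1 i j + pvG m2 i j) 2))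

def pvSub (m1 m2 : List (List Int)) : List (List Int) :=
  (List.range m1.length).map (fun i =>
    (List.range (m1.headD []).length).map (fun j =>
      PySem.Int.mod (pvG m1 i j - pvG m2 i j) 2))

-- Python int(dim/2) on a non-negative int is Nat division by 2.  The recursion is transcribed
-- structurally with a fuel argument (fuel = len(m1) at the top call; the dimension at least
-- halves at every recursive call, so the fuel never runs out on any call Python makes, and the
-- fuel-0 branch is reached only for dim = 0, where Python recurses without end — RecursionError,
-- outside Pre_).  The guard only makes the same recursion total.
def mulGo (fuel : Nat) (m1 m2 : List (List Int)) : List (List Int) :=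
  match fuel with
  | 0 => []
  | fuel + 1 =>
    let dim := m1.length
    if dim = 1 then
      [[pvG m1 0 0 * pvG m2 0 0]]
    else if dim = 0 then
      []
    else
      let s := dim / 2
      let m1_11 := pvSlice m1 0 s 0 s
      let m1_12 := pvSlice m1 0 s s dim
      let m1_21 := pvSlice m1 s dim 0 s
      let m1_22 := pvSlice m1 s dim s dim
      let m2_11 := pvSlice m2 0 s 0 s
      let m2_12 := pvSlice m2 0 s s dim
      let m2_21 := pvSlice m2 s dim 0 s
      let m2_22 := pvSlice m2 s dim s dim
      let d  := mulGo fuel (pvAdd m1_11 m1_22) (pvAdd m2_11 m2_22)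
      let d1 := mulGo fuel (pvSub m1_12 m1_22) (pvAdd m2_21 m2_22)
      let d2 := mulGo fuel (pvSub m1_21 m1_11) (pvAdd m2_11 m2_12)
      let h1 := mulGo fuel (pvAdd m1_11 m1_12) m2_22
      let h2 := mulGo fuel (pvAdd m1_21 m1_22) m2_11
      let v1 := mulGo fuel m1_22 (pvSub m2_21 m2_11)
      let v2 := mulGo fuel m1_11 (pvSub m2_12 m2_22)
      (List.range dim).map (fun i => (List.range dim).map (fun j =>
        PySem.Int.mod
          (if i < s then
             if j < s then pvG d i j + pvG d1 i j + pvG v1 i j - pvG h1 i j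
             else pvG v2 i (j - s) + pvG h1 i (j - s)
           else
             if j < s then pvG v1 (i - s) j + pvG h2 (i - s) j
             else pvG d (i - s) (j - s) + pvG d2 (i - s) (j - s) +
                  pvG v2 (i - s) (j - s) - pvG h2 (i - s) (j - s)) 2))

def mul_expanded (m1 : List (List Int)) (m2 : List (List Int)) : List (List Int) :=
  mulGo m1.length m1 m2

-- ===== PORT B =====
-- Source B: [[sum(m1[i][k]*m2[k][j] for k in range(n)) % 2 for j in range(n)] for i in range(n)]
def mul_expanded_alt (m1 : List (List Int)) (m2 : List (List Int)) : List (List Int) :=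
  let n := m1.length
  (List.range n).map (fun i => (List.range n).map (fun j =>
    PySem.Int.mod ((List.range n).foldl (fun acc k => acc + pvG m1 i k * pvG m2 k j) 0) 2))

-- ===== PRECONDITION & SPEC =====
-- Pre_ is A's working domain: n = len(m1) is a power of two and both arguments supply the full
-- leading n x n block A's recursion reads (entries beyond that block are ignored by both
-- programs).  Elsewhere A raises: an empty input or a missing row/entry makes a quadrant slice
-- too short and the recursion hits an IndexError or recurses forever on an empty quadrant
-- (RecursionError).
def Pre_mul_expanded (m1 : List (List Int)) (m2 : List (List Int)) : Prop :=
  m1.length = 2 ^ Nat.log2 m1.length ∧ m1.length ≤ m2.length ∧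
  (∀ r ∈ m1, m1.length ≤ r.length) ∧ (∀ r ∈ m2.take m1.length, m1.length ≤ r.length)
instance (m1 : List (List Int)) (m2 : List (List Int)) : Decidable (Pre_mul_expanded m1 m2) := by
  unfold Pre_mul_expanded; infer_instance

def pvWitness_mul_expanded : List (List Int) × List (List Int) :=
  ([[1, 0], [1, 1]], [[1, 1], [0, 1]])

-- On inputs with len(m1) == 1 whose two leading entries have a product not already 0 or 1,
-- A returns it raw and unreduced as [[a*b]] while B returns [[a*b % 2]], the intended GF(2)
-- value that A itself produces at every larger size.
def D_mul_expanded (m1 : List (List Int)) (m2 : List (List Int)) : Prop :=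
  m1.length = 1 ∧
  ((m1.headD []).headD 0 * (m2.headD []).headD 0 < 0 ∨
   1 < (m1.headD []).headD 0 * (m2.headD []).headD 0)
instance (m1 : List (List Int)) (m2 : List (List Int)) : Decidable (D_mul_expanded m1 m2) := by
  unfold D_mul_expanded; infer_instance

def Spec_mul_expanded (m1 : List (List Int)) (m2 : List (List Int)) (out : List (List Int)) : Prop :=
  ¬ D_mul_expanded m1 m2 → out = mul_expanded_alt m1 m2
instance (m1 : List (List Int)) (m2 : List (List Int)) (out : List (List Int)) :
    Decidable (Spec_mul_expanded m1 m2 out) := by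
  unfold Spec_mul_expanded; infer_instance

def pvDiffWitness_mul_expanded : List (List Int) × List (List Int) := ([[3]], [[5]])
def pvDiffWitnessOut_mul_expanded : (List (List Int)) × (List (List Int)) := ([[15]], [[1]])

-- ===== CLAIM =====
def Claim_unchanged_mul_expanded : Prop := ∀ (m1 : List (List Int)) (m2 : List (List Int)), Dom_mul_expanded m1 m2 → Pre_mul_expanded m1 m2 → Spec_mul_expanded m1 m2 (mul_expanded m1 m2)
def Claim_changed_mul_expanded : Prop := Dom_mul_expanded (pvDiffWitness_mul_expanded.1) (pvDiffWitness_mul_expanded.2) ∧ Pre_mul_expanded (pvDiffWitness_mul_expanded.1) (pvDiffWitness_mul_expanded.2) ∧ D_mul_expanded (pvDiffWitness_mul_expanded.1) (pvDiffWitness_mul_expanded.2) ∧ mul_expanded (pvDiffWitness_mul_expanded.1) (pvDiffWitness_mul_expanded.2) = pvDiffWitnessOut_mul_expanded.1 ∧ mul_expanded_alt (pvDiffWitness_mul_expanded.1) (pvDiffWitness_mul_expanded.2) = pvDiffWitnessOut_mul_expanded.2 ∧ pvDiffWitnessOut_mul_expanded.1 ≠ pvDiffWitnessOut_mul_expanded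.2
def Claim_exact_mul_expanded : Prop := ∀ (m1 : List (List Int)) (m2 : List (List Int)), Dom_mul_expanded m1 m2 → Pre_mul_expanded m1 m2 → D_mul_expanded m1 m2 → mul_expanded m1 m2 ≠ mul_expanded_alt m1 m2

-- ===== LEMMAS AND PROOFS =====

-- the matrix supplies a full leading n x n block
def pvSq (n : Nat) (m : List (List Int)) : Prop :=
  n ≤ m.length ∧ ∀ r ∈ m.take n, n ≤ r.length

-- the schoolbook dot-product entry
def pvDot (n : Nat) (m1 m2 : List (List Int)) (i j : Nat) : Int :=
  ∑ k ∈ Finset.range n, pvG m1 i k * pvG m2 k j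

theorem pvFoldl_sum (f : Nat → Int) (n : Nat) (init : Int) :
    (List.range n).foldl (fun acc k => acc + f k) init = init + ∑ k ∈ Finset.range n, f k := by
  induction n generalizing init with
  | zero => simp
  | succ n ih => simp [List.range_succ, Finset.sum_range_succ, ih, add_assoc]

theorem pvAlt_eq (m1 m2 : List (List Int)) :
    mul_expanded_alt m1 m2 =
      (List.range m1.length).map (fun i => (List.range m1.length).map (fun j =>
        PySem.Int.mod (pvDot m1.length m1 m2 i j) 2)) := by
  simp only [mul_expanded_alt]
  refine List.map_congr_left (fun i _ => ?_)
  refine List.map_congr_left (fun j _ => ?_)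
  rw [pvFoldl_sum, zero_add, pvDot]

theorem pvG_mapRange (g : Nat → Nat → Int) (n m i j : Nat) (hi : i < n) (hj : j < m) :
    pvG ((List.range n).map (fun i => (List.range m).map (g i))) i j = g i j := by
  simp [pvG, List.getD_eq_getElem?_getD, hi, hj]

theorem pvSq_row (n : Nat) (m : List (List Int)) (h : pvSq n m) (i : Nat) (hi : i < n) :
    n ≤ (m.getD i []).length := by
  have hl : i < m.length := by have := h.1; omega
  have htk : i < (m.take n).length := by simp [List.length_take]; omega
  have : (m.take n)[i] = m[i] := List.getElem_take
  rw [List.getD_eq_getElem _ _ hl]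
  exact this ▸ h.2 _ (List.getElem_mem htk)

theorem pvSq_head (n : Nat) (m : List (List Int)) (h : pvSq n m) (hn : 0 < n) :
    n ≤ (m.headD []).length := by
  have := pvSq_row n m h 0 hn
  cases m with
  | nil => have := h.1; simp at this; omega
  | cons x xs => simpa using this

theorem pvG_add (a b : List (List Int)) (i j : Nat) (hi : i < a.length)
    (hj : j < (a.headD []).length) :
    pvG (pvAdd a b) i j = PySem.Int.mod (pvG a i j + pvG b i j) 2 := by
  rw [pvAdd, pvG_mapRange _ _ _ _ _ hi hj]

theorem pvG_sub (a b : List (List Int)) (i j : Nat) (hi : i < a.length)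
    (hj : j < (a.headD []).length) :
    pvG (pvSub a b) i j = PySem.Int.mod (pvG a i j - pvG b i j) 2 := by
  rw [pvSub, pvG_mapRange _ _ _ _ _ hi hj]

theorem pvSlice_eq (m : List (List Int)) (r1 r2 c1 c2 : Nat) :
    pvSlice m r1 r2 c1 c2 =
      ((m.drop r1).take (r2 - r1)).map (fun row => (row.drop c1).take (c2 - c1)) := by
  simp [pvSlice, PySem.List.slice_natCast]

theorem pvG_slice (m : List (List Int)) (r1 r2 c1 c2 i j : Nat)
    (hi : i < r2 - r1) (him : r1 + i < m.length)
    (hj : j < c2 - c1) (hjm : c1 + j < (m.getD (r1 + i) []).length) :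
    pvG (pvSlice m r1 r2 c1 c2) i j = pvG m (r1 + i) (c1 + j) := by
  have hgd : m.getD (r1 + i) [] = m[r1 + i]'him := List.getD_eq_getElem m [] him
  have hlen : i < (((m.drop r1).take (r2 - r1)).map
      (fun row => (row.drop c1).take (c2 - c1))).length := by
    simp [List.length_take, List.length_drop]; omega
  rw [pvSlice_eq, pvG, List.getD_eq_getElem _ _ hlen, List.getElem_map,
      List.getElem_take, List.getElem_drop]
  rw [hgd] at hjm
  have hjlen : j < (((m[r1+i]'him).drop c1).take (c2 - c1)).length := by
    simp [List.length_take, List.length_drop]; omega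
  rw [pvG, hgd, List.getD_eq_getElem _ _ hjlen, List.getElem_take, List.getElem_drop,
      List.getD_eq_getElem _ _ hjm]

theorem pvSlice_len (n : Nat) (m : List (List Int)) (r1 r2 c1 c2 : Nat) (h : pvSq n m)
    (h2 : r2 ≤ n) : (pvSlice m r1 r2 c1 c2).length = r2 - r1 := by
  have := h.1
  simp [pvSlice_eq, List.length_take, List.length_drop]; omega

theorem pvSq_slice (n : Nat) (m : List (List Int)) (r1 r2 c1 c2 : Nat) (h : pvSq n m)
    (h2 : r2 ≤ n) (h4 : c2 ≤ n) (hrc : r2 - r1 = c2 - c1) :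
    pvSq (r2 - r1) (pvSlice m r1 r2 c1 c2) := by
  have hlen := pvSlice_len n m r1 r2 c1 c2 h h2
  refine ⟨by omega, ?_⟩
  intro r hrm
  have hrm' : r ∈ pvSlice m r1 r2 c1 c2 := List.mem_of_mem_take hrm
  rw [pvSlice_eq] at hrm'
  obtain ⟨row, hrow, rfl⟩ := List.mem_map.mp hrm'
  obtain ⟨i, hi, hrowi⟩ := List.getElem_of_mem hrow
  have hi2 : r1 + i < r2 := by
    simp [List.length_take, List.length_drop] at hi; omega
  have him : r1 + i < m.length := by have := h.1; omega
  have hrow_eq : row = m[r1 + i]'him := by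
    rw [← hrowi, List.getElem_take, List.getElem_drop]
  have hge : n ≤ row.length := by
    have htk : r1 + i < (m.take n).length := by simp [List.length_take]; omega
    have hteq : (m.take n)[r1 + i] = m[r1 + i]'him := List.getElem_take
    rw [hrow_eq]
    exact hteq ▸ h.2 _ (List.getElem_mem htk)
  simp [List.length_take, List.length_drop]
  omega

theorem pvAdd_length (a b : List (List Int)) : (pvAdd a b).length = a.length := by simp [pvAdd]
theorem pvSub_length (a b : List (List Int)) : (pvSub a b).length = a.length := by simp [pvSub]

theorem pvSq_add (s : Nat) (a b : List (List Int)) (ha : pvSq s a) (hs : 0 < s) :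
    pvSq s (pvAdd a b) := by
  have hhead := pvSq_head s a ha hs
  have hal := ha.1
  refine ⟨by simp [pvAdd]; omega, ?_⟩
  intro r hrm
  have hrm' := List.mem_of_mem_take hrm
  rw [pvAdd] at hrm'
  obtain ⟨i, _, rfl⟩ := List.mem_map.mp hrm'
  simpa using hhead

theorem pvSq_sub (s : Nat) (a b : List (List Int)) (ha : pvSq s a) (hs : 0 < s) :
    pvSq s (pvSub a b) := by
  have hhead := pvSq_head s a ha hs
  have hal := ha.1
  refine ⟨by simp [pvSub]; omega, ?_⟩
  intro r hrm
  have hrm' := List.mem_of_mem_take hrm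
  rw [pvSub] at hrm'
  obtain ⟨i, _, rfl⟩ := List.mem_map.mp hrm'
  simpa using hhead

theorem pvCast_mod2 (x : Int) : ((PySem.Int.mod x 2 : Int) : ZMod 2) = (x : ZMod 2) := by
  rw [PySem.Int.mod_eq_emod_of_pos (by norm_num : (0:Int) < 2)]
  exact (CharTwo.intCast_eq_mod x).symm

theorem pvMod2_congr (x y : Int) (h : (x : ZMod 2) = (y : ZMod 2)) :
    PySem.Int.mod x 2 = PySem.Int.mod y 2 := by
  rw [PySem.Int.mod_eq_emod_of_pos (by norm_num : (0:Int) < 2),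
      PySem.Int.mod_eq_emod_of_pos (by norm_num : (0:Int) < 2)]
  exact (ZMod.intCast_eq_intCast_iff x y 2).mp h

-- quadrant shapes
theorem pvSq_q11 (s : Nat) (m : List (List Int)) (h : pvSq (s + s) m) :
    pvSq s (pvSlice m 0 s 0 s) := by
  simpa using pvSq_slice (s + s) m 0 s 0 s h (by omega) (by omega) rfl
theorem pvSq_q12 (s : Nat) (m : List (List Int)) (h : pvSq (s + s) m) :
    pvSq s (pvSlice m 0 s s (s + s)) := by
  simpa using pvSq_slice (s + s) m 0 s s (s + s) h (by omega) (by omega) (by omega)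
theorem pvSq_q21 (s : Nat) (m : List (List Int)) (h : pvSq (s + s) m) :
    pvSq s (pvSlice m s (s + s) 0 s) := by
  have := pvSq_slice (s + s) m s (s + s) 0 s h (by omega) (by omega) (by omega)
  rwa [Nat.add_sub_cancel_left] at this
theorem pvSq_q22 (s : Nat) (m : List (List Int)) (h : pvSq (s + s) m) :
    pvSq s (pvSlice m s (s + s) s (s + s)) := by
  have := pvSq_slice (s + s) m s (s + s) s (s + s) h (by omega) (by omega) rfl
  rwa [Nat.add_sub_cancel_left] at this

-- quadrant entries
theorem pvG_q11 (s : Nat) (m : List (List Int)) (h : pvSq (s + s) m)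
    (a b : Nat) (ha : a < s) (hb : b < s) :
    pvG (pvSlice m 0 s 0 s) a b = pvG m a b := by
  have hrow : 0 + b < (m.getD (0 + a) []).length := by
    have := pvSq_row (s + s) m h (0 + a) (by omega); omega
  simpa using pvG_slice m 0 s 0 s a b (by omega) (by have := h.1; omega) (by omega) hrow
theorem pvG_q12 (s : Nat) (m : List (List Int)) (h : pvSq (s + s) m)
    (a b : Nat) (ha : a < s) (hb : b < s) :
    pvG (pvSlice m 0 s s (s + s)) a b = pvG m a (s + b) := by
  have hrow : s + b < (m.getD (0 + a) []).length := by
    have := pvSq_row (s + s) m h (0 + a) (by omega); omega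
  simpa using pvG_slice m 0 s s (s + s) a b (by omega) (by have := h.1; omega) (by omega) hrow
theorem pvG_q21 (s : Nat) (m : List (List Int)) (h : pvSq (s + s) m)
    (a b : Nat) (ha : a < s) (hb : b < s) :
    pvG (pvSlice m s (s + s) 0 s) a b = pvG m (s + a) b := by
  have hrow : 0 + b < (m.getD (s + a) []).length := by
    have := pvSq_row (s + s) m h (s + a) (by omega); omega
  simpa using pvG_slice m s (s + s) 0 s a b (by omega) (by have := h.1; omega) (by omega) hrow
theorem pvG_q22 (s : Nat) (m : List (List Int)) (h : pvSq (s + s) m)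
    (a b : Nat) (ha : a < s) (hb : b < s) :
    pvG (pvSlice m s (s + s) s (s + s)) a b = pvG m (s + a) (s + b) := by
  have hrow : s + b < (m.getD (s + a) []).length := by
    have := pvSq_row (s + s) m h (s + a) (by omega); omega
  simpa using pvG_slice m s (s + s) s (s + s) a b (by omega) (by have := h.1; omega) (by omega) hrow

theorem pvCast_addq (s : Nat) (X Y : List (List Int)) (hX : pvSq s X) (hs : 0 < s)
    (a b : Nat) (ha : a < s) (hb : b < s) :
    ((pvG (pvAdd X Y) a b : Int) : ZMod 2) =
      ((pvG X a b : Int) : ZMod 2) + ((pvG Y a b : Int) : ZMod 2) := by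
  rw [pvG_add X Y a b (by have := hX.1; omega) (by have := pvSq_head s X hX hs; omega), pvCast_mod2]
  push_cast; ring

theorem pvCast_subq (s : Nat) (X Y : List (List Int)) (hX : pvSq s X) (hs : 0 < s)
    (a b : Nat) (ha : a < s) (hb : b < s) :
    ((pvG (pvSub X Y) a b : Int) : ZMod 2) =
      ((pvG X a b : Int) : ZMod 2) - ((pvG Y a b : Int) : ZMod 2) := by
  rw [pvG_sub X Y a b (by have := hX.1; omega) (by have := pvSq_head s X hX hs; omega), pvCast_mod2]
  push_cast; ring

-- one Strassen sub-product, seen through the inductive hypothesis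
theorem pvProdCast (s f : Nat)
    (IH : ∀ a b : List (List Int), a.length = s → pvSq s a → pvSq s b → ∀ i j : Nat,
      i < s → j < s →
      ((pvG (mulGo f a b) i j : Int) : ZMod 2) = ((pvDot s a b i j : Int) : ZMod 2))
    (X Y : List (List Int)) (hXl : X.length = s) (hX : pvSq s X) (hY : pvSq s Y)
    (fX fY : Nat → Nat → ZMod 2)
    (hfX : ∀ a b : Nat, a < s → b < s → ((pvG X a b : Int) : ZMod 2) = fX a b)
    (hfY : ∀ a b : Nat, a < s → b < s → ((pvG Y a b : Int) : ZMod 2) = fY a b)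
    (i j : Nat) (hi : i < s) (hj : j < s) :
    ((pvG (mulGo f X Y) i j : Int) : ZMod 2) = ∑ b ∈ Finset.range s, fX i b * fY b j := by
  rw [IH X Y hXl hX hY i j hi hj, pvDot]
  push_cast
  exact Finset.sum_congr rfl (fun b hb => by
    rw [hfX i b hi (Finset.mem_range.mp hb), hfY b j (Finset.mem_range.mp hb) hj])

-- main invariant: on square 2^k matrices the Strassen recursion computes the schoolbook product
-- mod 2 (entrywise equal to it for k >= 1; for k = 0 only congruent mod 2).
theorem pvMain (k : Nat) : ∀ (fuel : Nat) (m1 m2 : List (List Int)), 2 ^ k ≤ fuel →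
    m1.length = 2 ^ k → pvSq (2 ^ k) m1 → pvSq (2 ^ k) m2 →
    (∀ i j : Nat, i < 2 ^ k → j < 2 ^ k →
      ((pvG (mulGo fuel m1 m2) i j : Int) : ZMod 2) =
        ((pvDot (2 ^ k) m1 m2 i j : Int) : ZMod 2)) ∧
    (1 ≤ k → mulGo fuel m1 m2 =
      (List.range (2 ^ k)).map (fun i => (List.range (2 ^ k)).map (fun j =>
        PySem.Int.mod (pvDot (2 ^ k) m1 m2 i j) 2))) := by
  induction k with
  | zero =>
    intro fuel m1 m2 hfuel hlen h1 h2
    obtain ⟨f, rfl⟩ : ∃ f, fuel = f + 1 := ⟨fuel - 1, by have := hfuel; omega⟩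
    refine ⟨?_, by omega⟩
    intro i j hi hj
    obtain rfl : i = 0 := by simpa using hi
    obtain rfl : j = 0 := by simpa using hj
    have hm : mulGo (f + 1) m1 m2 = [[pvG m1 0 0 * pvG m2 0 0]] := by
      rw [mulGo]; simp [hlen]
    have hdot : pvDot (2 ^ 0) m1 m2 0 0 = pvG m1 0 0 * pvG m2 0 0 := by
      simp [pvDot]
    rw [hm, hdot]
    simp [pvG]
  | succ k ih =>
    intro fuel m1 m2 hfuel hlen h1 h2
    have hss : 2 ^ (k + 1) = 2 ^ k + 2 ^ k := by rw [pow_succ]; omega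
    rw [hss] at h1 h2 hfuel hlen ⊢
    have hs : 0 < 2 ^ k := Nat.two_pow_pos k
    generalize hgen : 2 ^ k = s at h1 h2 ih hs hfuel hlen
    obtain ⟨f, rfl⟩ : ∃ f, fuel = f + 1 := ⟨fuel - 1, by omega⟩
    -- the inductive hypothesis, entry form
    have ih' : ∀ a b : List (List Int), a.length = s → pvSq s a → pvSq s b → ∀ i j : Nat,
        i < s → j < s →
        ((pvG (mulGo f a b) i j : Int) : ZMod 2) = ((pvDot s a b i j : Int) : ZMod 2) :=
      fun a b hal ha hb => (ih f a b (by omega) hal ha hb).1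
    -- exact lengths of the eight quadrants
    have hl11₁ : (pvSlice m1 0 s 0 s).length = s := by
      rw [pvSlice_len (s + s) m1 0 s 0 s h1 (by omega)]; omega
    have hl12₁ : (pvSlice m1 0 s s (s + s)).length = s := by
      rw [pvSlice_len (s + s) m1 0 s s (s + s) h1 (by omega)]; omega
    have hl21₁ : (pvSlice m1 s (s + s) 0 s).length = s := by
      rw [pvSlice_len (s + s) m1 s (s + s) 0 s h1 (by omega)]; omega
    have hl22₁ : (pvSlice m1 s (s + s) s (s + s)).length = s := by
      rw [pvSlice_len (s + s) m1 s (s + s) s (s + s) h1 (by omega)]; omega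
    -- shapes of the eight quadrants
    have hq11₁ := pvSq_q11 s m1 h1
    have hq12₁ := pvSq_q12 s m1 h1
    have hq21₁ := pvSq_q21 s m1 h1
    have hq22₁ := pvSq_q22 s m1 h1
    have hq11₂ := pvSq_q11 s m2 h2
    have hq12₂ := pvSq_q12 s m2 h2
    have hq21₂ := pvSq_q21 s m2 h2
    have hq22₂ := pvSq_q22 s m2 h2
    -- the seven sub-products, entrywise through the inductive hypothesis
    have hd : ∀ p q : Nat, p < s → q < s →
        ((pvG (mulGo f (pvAdd (pvSlice m1 0 s 0 s) (pvSlice m1 s (s + s) s (s + s)))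
                            (pvAdd (pvSlice m2 0 s 0 s) (pvSlice m2 s (s + s) s (s + s)))) p q : Int) : ZMod 2)
        = ∑ b ∈ Finset.range s,
            (((pvG m1 p b : Int) : ZMod 2) + ((pvG m1 (s + p) (s + b) : Int) : ZMod 2)) *
            (((pvG m2 b q : Int) : ZMod 2) + ((pvG m2 (s + b) (s + q) : Int) : ZMod 2)) := by
      intro p q hp hq
      exact pvProdCast s f ih' _ _ (by rw [pvAdd_length, hl11₁]) (pvSq_add s _ _ hq11₁ hs) (pvSq_add s _ _ hq11₂ hs)
        (fun a b => ((pvG m1 a b : Int) : ZMod 2) + ((pvG m1 (s + a) (s + b) : Int) : ZMod 2))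
        (fun a b => ((pvG m2 a b : Int) : ZMod 2) + ((pvG m2 (s + a) (s + b) : Int) : ZMod 2))
        (fun a b ha hb => by
          rw [pvCast_addq s _ _ hq11₁ hs a b ha hb, pvG_q11 s m1 h1 a b ha hb,
              pvG_q22 s m1 h1 a b ha hb])
        (fun a b ha hb => by
          rw [pvCast_addq s _ _ hq11₂ hs a b ha hb, pvG_q11 s m2 h2 a b ha hb,
              pvG_q22 s m2 h2 a b ha hb]) p q hp hq
    have hd1 : ∀ p q : Nat, p < s → q < s →
        ((pvG (mulGo f (pvSub (pvSlice m1 0 s s (s + s)) (pvSlice m1 s (s + s) s (s + s)))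
                            (pvAdd (pvSlice m2 s (s + s) 0 s) (pvSlice m2 s (s + s) s (s + s)))) p q : Int) : ZMod 2)
        = ∑ b ∈ Finset.range s,
            (((pvG m1 p (s + b) : Int) : ZMod 2) - ((pvG m1 (s + p) (s + b) : Int) : ZMod 2)) *
            (((pvG m2 (s + b) q : Int) : ZMod 2) + ((pvG m2 (s + b) (s + q) : Int) : ZMod 2)) := by
      intro p q hp hq
      exact pvProdCast s f ih' _ _ (by rw [pvSub_length, hl12₁]) (pvSq_sub s _ _ hq12₁ hs) (pvSq_add s _ _ hq21₂ hs)
        (fun a b => ((pvG m1 a (s + b) : Int) : ZMod 2) - ((pvG m1 (s + a) (s + b) : Int) : ZMod 2))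
        (fun a b => ((pvG m2 (s + a) b : Int) : ZMod 2) + ((pvG m2 (s + a) (s + b) : Int) : ZMod 2))
        (fun a b ha hb => by
          rw [pvCast_subq s _ _ hq12₁ hs a b ha hb, pvG_q12 s m1 h1 a b ha hb,
              pvG_q22 s m1 h1 a b ha hb])
        (fun a b ha hb => by
          rw [pvCast_addq s _ _ hq21₂ hs a b ha hb, pvG_q21 s m2 h2 a b ha hb,
              pvG_q22 s m2 h2 a b ha hb]) p q hp hq
    have hd2 : ∀ p q : Nat, p < s → q < s →
        ((pvG (mulGo f (pvSub (pvSlice m1 s (s + s) 0 s) (pvSlice m1 0 s 0 s))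
                            (pvAdd (pvSlice m2 0 s 0 s) (pvSlice m2 0 s s (s + s)))) p q : Int) : ZMod 2)
        = ∑ b ∈ Finset.range s,
            (((pvG m1 (s + p) b : Int) : ZMod 2) - ((pvG m1 p b : Int) : ZMod 2)) *
            (((pvG m2 b q : Int) : ZMod 2) + ((pvG m2 b (s + q) : Int) : ZMod 2)) := by
      intro p q hp hq
      exact pvProdCast s f ih' _ _ (by rw [pvSub_length, hl21₁]) (pvSq_sub s _ _ hq21₁ hs) (pvSq_add s _ _ hq11₂ hs)
        (fun a b => ((pvG m1 (s + a) b : Int) : ZMod 2) - ((pvG m1 a b : Int) : ZMod 2))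
        (fun a b => ((pvG m2 a b : Int) : ZMod 2) + ((pvG m2 a (s + b) : Int) : ZMod 2))
        (fun a b ha hb => by
          rw [pvCast_subq s _ _ hq21₁ hs a b ha hb, pvG_q21 s m1 h1 a b ha hb,
              pvG_q11 s m1 h1 a b ha hb])
        (fun a b ha hb => by
          rw [pvCast_addq s _ _ hq11₂ hs a b ha hb, pvG_q11 s m2 h2 a b ha hb,
              pvG_q12 s m2 h2 a b ha hb]) p q hp hq
    have hh1 : ∀ p q : Nat, p < s → q < s →
        ((pvG (mulGo f (pvAdd (pvSlice m1 0 s 0 s) (pvSlice m1 0 s s (s + s)))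
                            (pvSlice m2 s (s + s) s (s + s))) p q : Int) : ZMod 2)
        = ∑ b ∈ Finset.range s,
            (((pvG m1 p b : Int) : ZMod 2) + ((pvG m1 p (s + b) : Int) : ZMod 2)) *
            ((pvG m2 (s + b) (s + q) : Int) : ZMod 2) := by
      intro p q hp hq
      exact pvProdCast s f ih' _ _ (by rw [pvAdd_length, hl11₁]) (pvSq_add s _ _ hq11₁ hs) hq22₂
        (fun a b => ((pvG m1 a b : Int) : ZMod 2) + ((pvG m1 a (s + b) : Int) : ZMod 2))
        (fun a b => ((pvG m2 (s + a) (s + b) : Int) : ZMod 2))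
        (fun a b ha hb => by
          rw [pvCast_addq s _ _ hq11₁ hs a b ha hb, pvG_q11 s m1 h1 a b ha hb,
              pvG_q12 s m1 h1 a b ha hb])
        (fun a b ha hb => by rw [pvG_q22 s m2 h2 a b ha hb]) p q hp hq
    have hh2 : ∀ p q : Nat, p < s → q < s →
        ((pvG (mulGo f (pvAdd (pvSlice m1 s (s + s) 0 s) (pvSlice m1 s (s + s) s (s + s)))
                            (pvSlice m2 0 s 0 s)) p q : Int) : ZMod 2)
        = ∑ b ∈ Finset.range s,
            (((pvG m1 (s + p) b : Int) : ZMod 2) + ((pvG m1 (s + p) (s + b) : Int) : ZMod 2)) *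
            ((pvG m2 b q : Int) : ZMod 2) := by
      intro p q hp hq
      exact pvProdCast s f ih' _ _ (by rw [pvAdd_length, hl21₁]) (pvSq_add s _ _ hq21₁ hs) hq11₂
        (fun a b => ((pvG m1 (s + a) b : Int) : ZMod 2) + ((pvG m1 (s + a) (s + b) : Int) : ZMod 2))
        (fun a b => ((pvG m2 a b : Int) : ZMod 2))
        (fun a b ha hb => by
          rw [pvCast_addq s _ _ hq21₁ hs a b ha hb, pvG_q21 s m1 h1 a b ha hb,
              pvG_q22 s m1 h1 a b ha hb])
        (fun a b ha hb => by rw [pvG_q11 s m2 h2 a b ha hb]) p q hp hq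
    have hv1 : ∀ p q : Nat, p < s → q < s →
        ((pvG (mulGo f (pvSlice m1 s (s + s) s (s + s))
                            (pvSub (pvSlice m2 s (s + s) 0 s) (pvSlice m2 0 s 0 s))) p q : Int) : ZMod 2)
        = ∑ b ∈ Finset.range s,
            ((pvG m1 (s + p) (s + b) : Int) : ZMod 2) *
            (((pvG m2 (s + b) q : Int) : ZMod 2) - ((pvG m2 b q : Int) : ZMod 2)) := by
      intro p q hp hq
      exact pvProdCast s f ih' _ _ hl22₁ hq22₁ (pvSq_sub s _ _ hq21₂ hs)
        (fun a b => ((pvG m1 (s + a) (s + b) : Int) : ZMod 2))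
        (fun a b => ((pvG m2 (s + a) b : Int) : ZMod 2) - ((pvG m2 a b : Int) : ZMod 2))
        (fun a b ha hb => by rw [pvG_q22 s m1 h1 a b ha hb])
        (fun a b ha hb => by
          rw [pvCast_subq s _ _ hq21₂ hs a b ha hb, pvG_q21 s m2 h2 a b ha hb,
              pvG_q11 s m2 h2 a b ha hb]) p q hp hq
    have hv2 : ∀ p q : Nat, p < s → q < s →
        ((pvG (mulGo f (pvSlice m1 0 s 0 s)
                            (pvSub (pvSlice m2 0 s s (s + s)) (pvSlice m2 s (s + s) s (s + s)))) p q : Int) : ZMod 2)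
        = ∑ b ∈ Finset.range s,
            ((pvG m1 p b : Int) : ZMod 2) *
            (((pvG m2 b (s + q) : Int) : ZMod 2) - ((pvG m2 (s + b) (s + q) : Int) : ZMod 2)) := by
      intro p q hp hq
      exact pvProdCast s f ih' _ _ hl11₁ hq11₁ (pvSq_sub s _ _ hq12₂ hs)
        (fun a b => ((pvG m1 a b : Int) : ZMod 2))
        (fun a b => ((pvG m2 a (s + b) : Int) : ZMod 2) - ((pvG m2 (s + a) (s + b) : Int) : ZMod 2))
        (fun a b ha hb => by rw [pvG_q11 s m1 h1 a b ha hb])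
        (fun a b ha hb => by
          rw [pvCast_subq s _ _ hq12₂ hs a b ha hb, pvG_q12 s m2 h2 a b ha hb,
              pvG_q22 s m2 h2 a b ha hb]) p q hp hq
    -- split of the long dot product
    have hsplit : ∀ i j : Nat,
        ((pvDot (s + s) m1 m2 i j : Int) : ZMod 2) =
          (∑ b ∈ Finset.range s, ((pvG m1 i b : Int) : ZMod 2) * ((pvG m2 b j : Int) : ZMod 2)) +
          ∑ b ∈ Finset.range s, ((pvG m1 i (s + b) : Int) : ZMod 2) * ((pvG m2 (s + b) j : Int) : ZMod 2) := by
      intro i j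
      rw [pvDot, Finset.sum_range_add]
      push_cast
      ring
    -- the unfolded recursion
    have hmain : mulGo (f + 1) m1 m2 =
        (List.range (s + s)).map (fun i => (List.range (s + s)).map (fun j =>
          PySem.Int.mod (pvDot (s + s) m1 m2 i j) 2)) := by
      conv_lhs => rw [mulGo]
      simp only [hlen, if_neg (by omega : ¬ s + s = 1),
        if_neg (by omega : ¬ s + s = 0)]
      have hhalf : (s + s) / 2 = s := by omega
      simp only [hhalf]
      refine List.map_congr_left (fun i hi => ?_)
      refine List.map_congr_left (fun j hj => ?_)
      simp only [List.mem_range] at hi hj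
      apply pvMod2_congr
      by_cases hi' : i < s
      · by_cases hj' : j < s
        · rw [if_pos hi', if_pos hj', hsplit i j]
          push_cast
          rw [hd i j hi' hj', hd1 i j hi' hj', hv1 i j hi' hj', hh1 i j hi' hj',
              ← Finset.sum_add_distrib, ← Finset.sum_add_distrib, ← Finset.sum_sub_distrib,
              ← Finset.sum_add_distrib]
          exact Finset.sum_congr rfl (fun b hb => by ring)
        · obtain ⟨j', rfl⟩ : ∃ j', j = s + j' := ⟨j - s, by omega⟩
          have hj'' : j' < s := by omega
          rw [if_pos hi', if_neg hj', Nat.add_sub_cancel_left, hsplit i (s + j')]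
          push_cast
          rw [hv2 i j' hi' hj'', hh1 i j' hi' hj'',
              ← Finset.sum_add_distrib, ← Finset.sum_add_distrib]
          exact Finset.sum_congr rfl (fun b hb => by ring)
      · obtain ⟨i', rfl⟩ : ∃ i', i = s + i' := ⟨i - s, by omega⟩
        have hi'' : i' < s := by omega
        by_cases hj' : j < s
        · rw [if_neg hi', if_pos hj', Nat.add_sub_cancel_left, hsplit (s + i') j]
          push_cast
          rw [hv1 i' j hi'' hj', hh2 i' j hi'' hj',
              ← Finset.sum_add_distrib, ← Finset.sum_add_distrib]
          exact Finset.sum_congr rfl (fun b hb => by ring)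
        · obtain ⟨j', rfl⟩ : ∃ j', j = s + j' := ⟨j - s, by omega⟩
          have hj'' : j' < s := by omega
          rw [if_neg hi', if_neg hj', Nat.add_sub_cancel_left, Nat.add_sub_cancel_left,
              hsplit (s + i') (s + j')]
          push_cast
          rw [hd i' j' hi'' hj'', hd2 i' j' hi'' hj'', hv2 i' j' hi'' hj'',
              hh2 i' j' hi'' hj'',
              ← Finset.sum_add_distrib, ← Finset.sum_add_distrib, ← Finset.sum_sub_distrib,
              ← Finset.sum_add_distrib]
          exact Finset.sum_congr rfl (fun b hb => by ring)
    refine ⟨?_, fun _ => hmain⟩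
    intro i j hi hj
    rw [hmain, pvG_mapRange _ _ _ _ _ hi hj, pvCast_mod2]

theorem pvHead_eq (m : List (List Int)) : (m.headD []).headD 0 = pvG m 0 0 := by
  cases m with
  | nil => rfl
  | cons r t => cases r <;> rfl

theorem pvOne_mul (m1 m2 : List (List Int)) (h : m1.length = 1) :
    mul_expanded m1 m2 = [[pvG m1 0 0 * pvG m2 0 0]] := by
  rw [mul_expanded, h, mulGo]; simp [h]

theorem pvOne_alt (m1 m2 : List (List Int)) (h : m1.length = 1) :
    mul_expanded_alt m1 m2 = [[PySem.Int.mod (pvG m1 0 0 * pvG m2 0 0) 2]] := by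
  rw [pvAlt_eq, h]
  simp [pvDot]

-- ===== VERDICT =====
theorem mul_expanded_spec : Claim_unchanged_mul_expanded := by
  intro m1 m2 _ hpre hnd
  obtain ⟨hp1, hp2, hp3, hp4⟩ := hpre
  by_cases hk1 : m1.length = 1
  · have halt := pvOne_alt m1 m2 hk1
    have hmul := pvOne_mul m1 m2 hk1
    have hD : ¬ ((m1.headD []).headD 0 * (m2.headD []).headD 0 < 0 ∨
        1 < (m1.headD []).headD 0 * (m2.headD []).headD 0) := by
      intro hcon
      exact hnd ⟨hk1, hcon⟩
    rw [pvHead_eq, pvHead_eq] at hD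
    have hbound : 0 ≤ pvG m1 0 0 * pvG m2 0 0 ∧ pvG m1 0 0 * pvG m2 0 0 < 2 := by omega
    have hmod : PySem.Int.mod (pvG m1 0 0 * pvG m2 0 0) 2 = pvG m1 0 0 * pvG m2 0 0 := by
      rw [PySem.Int.mod_eq_emod_of_pos (by norm_num : (0:Int) < 2),
          Int.emod_eq_of_lt hbound.1 hbound.2]
    rw [hmul, halt, hmod]
  · set K := Nat.log2 m1.length with hKdef
    have hK1 : 1 ≤ K := by
      by_contra hcon
      have : K = 0 := by omega
      rw [this] at hp1
      simp at hp1
      exact hk1 hp1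
    have h1 : pvSq (2 ^ K) m1 :=
      ⟨le_of_eq hp1.symm, fun r hr => hp1 ▸ hp3 r (List.mem_of_mem_take hr)⟩
    have h2 : pvSq (2 ^ K) m2 :=
      ⟨by omega, fun r hr => hp1 ▸ hp4 r (by rw [hp1]; exact hr)⟩
    obtain ⟨-, hmain⟩ := pvMain K m1.length m1 m2 (le_of_eq hp1.symm) hp1 h1 h2
    rw [mul_expanded, hmain hK1, pvAlt_eq, hp1]

theorem mul_expanded_changed : Claim_changed_mul_expanded := by
  unfold Claim_changed_mul_expanded; decide

theorem mul_expanded_tight : Claim_exact_mul_expanded := by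
  intro m1 m2 _ _ hd heq
  obtain ⟨hl1, hp⟩ := hd
  rw [pvHead_eq, pvHead_eq] at hp
  rw [pvOne_mul m1 m2 hl1, pvOne_alt m1 m2 hl1] at heq
  have hmodeq : pvG m1 0 0 * pvG m2 0 0 = PySem.Int.mod (pvG m1 0 0 * pvG m2 0 0) 2 := by
    simpa using heq
  have h0 := PySem.Int.mod_nonneg (pvG m1 0 0 * pvG m2 0 0) (by norm_num : (0:Int) < 2)
  have h2 := PySem.Int.mod_lt (pvG m1 0 0 * pvG m2 0 0) (by norm_num : (0:Int) < 2)
  omega
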